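-- pv_equiv track=rewrite | github.com/ckswls56/BaejoonHub | 프로그래머스/unrated/181873. 특정한 문자를 대문자로 바꾸기/특정한 문자를 대문자로 바꾸기.py | solution
-- ===== SOURCE A (Python) =====
-- def solution(my_string, alp):
--     answer = ''
--     for s in my_string :
--         if s in alp:
--             answer+=s.upper()
--         else :
--             answer+=s
--     return answer
-- ===== SOURCE B (Python) =====
-- def solution(my_string, alp):
--     # Staged passes: for each character of alp, rewrite the whole string once,
--     # replacing every occurrence of that character with its uppercase form.
--     # Correct because uppercasing is idempotent on ASCII, so later passes never
--     # disturb characters already uppercased by earlier ones.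
--     for c in alp:
--         my_string = my_string.replace(c, c.upper())
--     return my_string
-- ===== Notes on version B (the rewrite author's own statement) =====
-- stated objective: alternative
-- what changed: B loops over alp, not over my_string: each character of alp drives one whole-string str.replace pass (c -> c.upper()), instead of a single scan of my_string with a per-character membership test against alp; correct because ASCII uppercasing is idempotent so the staged replaces compose to the same pointwise map.
import Mathlib
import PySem

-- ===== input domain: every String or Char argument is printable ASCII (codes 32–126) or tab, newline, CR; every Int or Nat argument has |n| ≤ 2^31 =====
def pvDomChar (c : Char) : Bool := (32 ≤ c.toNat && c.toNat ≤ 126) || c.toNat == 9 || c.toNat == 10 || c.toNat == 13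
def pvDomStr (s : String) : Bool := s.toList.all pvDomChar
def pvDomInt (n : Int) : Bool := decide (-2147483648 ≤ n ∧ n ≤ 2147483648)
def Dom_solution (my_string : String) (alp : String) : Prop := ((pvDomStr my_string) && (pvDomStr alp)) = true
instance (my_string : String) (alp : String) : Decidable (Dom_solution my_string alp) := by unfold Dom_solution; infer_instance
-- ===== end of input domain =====

-- B loops over alp and runs one whole-string replace pass per alp character instead of
-- scanning my_string once with a membership test; same cost, different traversal (alternative).

-- ===== PORT A =====
-- for s in my_string: answer += s.upper() if s in alp else s
def solution (my_string : String) (alp : String) : String :=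
  String.ofList (my_string.toList.foldl
    (fun answer s =>
      answer ++ (if alp.toList.contains s then [PySem.Chars.upperChar s] else [s])) [])

-- ===== PORT B =====
-- for c in alp: my_string = my_string.replace(c, c.upper())
def solution_alt (my_string : String) (alp : String) : String :=
  alp.toList.foldl
    (fun acc c => PySem.Str.replace acc (String.ofList [c]) (String.ofList [PySem.Chars.upperChar c]))
    my_string

-- ===== PRECONDITION & SPEC =====
def Spec_solution (my_string : String) (alp : String) (out : String) : Prop := out = solution_alt my_string alp
instance (my_string : String) (alp : String) (out : String) : Decidable (Spec_solution my_string alp out) := by unfold Spec_solution; infer_instance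

-- ===== CLAIM (what is proved, stated in full; the proofs are below) =====
def Claim_equal_solution : Prop := ∀ (my_string : String) (alp : String), Dom_solution my_string alp → Spec_solution my_string alp (solution my_string alp)

-- ===== LEMMAS AND PROOFS =====

-- uppercasing a character twice is the same as once
theorem upper_idem (c : Char) :
    PySem.Chars.upperChar (PySem.Chars.upperChar c) = PySem.Chars.upperChar c := by
  unfold PySem.Chars.upperChar PySem.Chars.islower
  by_cases h1 : 'a' ≤ c
  · by_cases h2 : c ≤ 'z'
    · have ha : 97 ≤ c.toNat := h1
      have hz : c.toNat ≤ 122 := h2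
      have hv : Nat.isValidChar (c.toNat - 32) := Or.inl (by omega)
      have ht : (Char.ofNat (c.toNat - 32)).toNat = c.toNat - 32 := by
        simp [Char.ofNat, hv]
      simp only [h1, h2, decide_true, Bool.and_self, if_true]
      have hnl : ¬ ('a' ≤ Char.ofNat (c.toNat - 32)) := by
        intro hle
        have : 97 ≤ (Char.ofNat (c.toNat - 32)).toNat := hle
        omega
      simp [hnl]
    · simp [h2]
  · simp [h1]

-- the pointwise effect of the chain of single-character substitution passes
def chainApply (cs : List Char) (x : Char) : Char :=
  cs.foldl (fun x c => if x = c then PySem.Chars.upperChar c else x) x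

theorem chainApply_fixed (cs : List Char) (x : Char)
    (h : PySem.Chars.upperChar x = x) : chainApply cs x = x := by
  induction cs with
  | nil => rfl
  | cons c t ih =>
    unfold chainApply
    by_cases hc : x = c
    · subst hc
      simpa [chainApply, h] using ih
    · simpa [chainApply, hc] using ih

theorem chainApply_eq (cs : List Char) (x : Char) :
    chainApply cs x = if x ∈ cs then PySem.Chars.upperChar x else x := by
  induction cs with
  | nil => simp [chainApply]
  | cons c t ih =>
    by_cases hc : x = c
    · subst hc
      have : chainApply (x :: t) x = chainApply t (PySem.Chars.upperChar x) := by
        simp [chainApply]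
      rw [this, chainApply_fixed t _ (upper_idem x)]
      simp
    · have : chainApply (c :: t) x = chainApply t x := by
        simp [chainApply, hc]
      rw [this, ih]
      simp [hc]

-- replace with a single-character pattern is a pointwise map
theorem replace_go_single (c u : Char) (l acc : List Char) (fuel : Nat)
    (h : l.length ≤ fuel) :
    PySem.Chars.replace.go [c] [u] fuel l acc =
      acc.reverse ++ l.map (fun x => if x = c then u else x) := by
  induction l generalizing fuel acc with
  | nil =>
    cases fuel <;> simp [PySem.Chars.replace.go]
  | cons c' t ih =>
    cases fuel with
    | zero => simp at h
    | succ fuel =>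
      by_cases hc : c = c'
      · subst hc
        have : PySem.Chars.replace.go [c] [u] (fuel + 1) (c :: t) acc =
            PySem.Chars.replace.go [c] [u] fuel t (u :: acc) := by
          simp [PySem.Chars.replace.go, List.isPrefixOf]
        rw [this, ih (u :: acc) fuel (by simpa using h)]
        simp
      · have : PySem.Chars.replace.go [c] [u] (fuel + 1) (c' :: t) acc =
            PySem.Chars.replace.go [c] [u] fuel t (c' :: acc) := by
          simp [PySem.Chars.replace.go, List.isPrefixOf, hc]
        rw [this, ih (c' :: acc) fuel (by simpa using h)]
        simp [Ne.symm hc]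

theorem replace_single (s : List Char) (c u : Char) :
    PySem.Chars.replace s [c] [u] = s.map (fun x => if x = c then u else x) := by
  unfold PySem.Chars.replace
  simpa using replace_go_single c u s [] s.length le_rfl

-- the chain of replace passes, at the List Char level, is one map of chainApply
theorem foldl_replace_eq_map (cs : List Char) (s : List Char) :
    cs.foldl (fun l c => PySem.Chars.replace l [c] [PySem.Chars.upperChar c]) s =
      s.map (chainApply cs) := by
  induction cs generalizing s with
  | nil => unfold chainApply; simp
  | cons c t ih =>
    rw [List.foldl_cons, replace_single, ih, List.map_map]
    apply List.map_congr_left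
    intro x _
    simp [chainApply, Function.comp]

theorem solution_alt_toList (my_string : String) (alp : String) :
    (solution_alt my_string alp).toList = my_string.toList.map (chainApply alp.toList) := by
  unfold solution_alt
  rw [← foldl_replace_eq_map]
  generalize alp.toList = cs
  induction cs generalizing my_string with
  | nil => simp
  | cons c t ih =>
    simp only [List.foldl_cons]
    rw [ih]
    simp [PySem.Str.replace, String.toList_ofList]

theorem solution_eq_alt (my_string : String) (alp : String) :
    solution my_string alp = solution_alt my_string alp := by
  have hlist : (solution my_string alp).toList = (solution_alt my_string alp).toList := by
    rw [solution_alt_toList]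
    unfold solution
    have hfun : (fun (answer : List Char) s =>
        answer ++ (if alp.toList.contains s then [PySem.Chars.upperChar s] else [s]))
        = fun answer s =>
          answer ++ [if alp.toList.contains s then PySem.Chars.upperChar s else s] := by
      funext a s; by_cases h : s ∈ alp.toList <;> simp [h]
    rw [hfun, PySem.List.foldl_append_singleton_eq_map, List.nil_append]
    simp only [String.toList_ofList]
    apply List.map_congr_left
    intro x _
    rw [chainApply_eq]
    by_cases h : x ∈ alp.toList <;> simp [h]
  calc solution my_string alp = String.ofList (solution my_string alp).toList :=
        (String.ofList_toList).symm
    _ = String.ofList (solution_alt my_string alp).toList := by rw [hlist]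
    _ = solution_alt my_string alp := String.ofList_toList

-- ===== VERDICT (by name: the statement is the Claim_ definition above) =====
theorem solution_spec : Claim_equal_solution := by
  intro my_string alp _
  unfold Spec_solution
  exact solution_eq_alt my_string alp
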